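-- pv_equiv track=rewrite | github.com/adilo231/HISBmodel-python | graphs/1.py | selected_Kb_Kt_nodes
-- ===== SOURCE A (Python) =====
-- def selected_Kb_Kt_nodes(ListOFscore,K_node):
--     Kb=[]
--     Kt=[]
--     i=0
--     for score,each,strategy in ListOFscore:
--         #score,each,strategy{BNS,TCS}
--         if i==K_node:
--             break
--         if strategy=='BNS':
--             Kb.append(each)
--             i+=1
--         elif strategy=='TCS':
--             Kt.append(each)
--             i+=1
--
--     return Kb,Kt
-- ===== SOURCE B (Python) =====
-- def selected_Kb_Kt_nodes(ListOFscore, K_node):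
--     matches = [(each, strategy) for _, each, strategy in ListOFscore
--                if strategy in ('BNS', 'TCS')]
--     selected = matches if K_node < 0 else matches[:K_node]
--     Kb = [each for each, strategy in selected if strategy == 'BNS']
--     Kt = [each for each, strategy in selected if strategy == 'TCS']
--     return Kb, Kt
-- ===== Notes on version B (the rewrite author's own statement) =====
-- stated objective: simpler
-- what changed: Replaces the counter-and-break loop by filter-then-slice-then-partition: collect all BNS/TCS entries, keep the first K_node of them (all when K_node is negative, matching A's never-break behavior), and split that prefix into the two lists.
import Mathlib
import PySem

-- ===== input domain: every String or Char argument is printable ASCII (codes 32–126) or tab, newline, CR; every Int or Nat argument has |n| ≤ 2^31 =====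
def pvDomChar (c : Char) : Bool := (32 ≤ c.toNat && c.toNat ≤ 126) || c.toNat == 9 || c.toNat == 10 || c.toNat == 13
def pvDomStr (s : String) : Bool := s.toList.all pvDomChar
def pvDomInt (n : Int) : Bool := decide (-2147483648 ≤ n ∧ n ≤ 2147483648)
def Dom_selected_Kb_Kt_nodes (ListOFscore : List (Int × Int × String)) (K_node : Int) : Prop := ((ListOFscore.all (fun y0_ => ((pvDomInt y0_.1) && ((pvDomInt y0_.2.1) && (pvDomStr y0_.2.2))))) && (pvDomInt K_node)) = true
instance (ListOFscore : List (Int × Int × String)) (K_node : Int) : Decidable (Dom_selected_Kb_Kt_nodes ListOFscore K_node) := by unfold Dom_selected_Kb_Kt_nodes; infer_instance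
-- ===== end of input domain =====

-- B replaces A's counter-and-break loop by filter, prefix-take, partition: a plainer decomposition, same cost.

-- ===== PORT A =====
-- A: one loop with accumulators Kb, Kt and counter i; break when i == K_node (checked before each element).
def pvLoopA (K_node : Int) : List (Int × Int × String) → List Int → List Int → Int → List Int × List Int
  | [], Kb, Kt, _ => (Kb, Kt)
  | (_, each, strategy) :: rest, Kb, Kt, i =>
    if i = K_node then (Kb, Kt)
    else if strategy = "BNS" then pvLoopA K_node rest (Kb ++ [each]) Kt (i + 1)
    else if strategy = "TCS" then pvLoopA K_node rest Kb (Kt ++ [each]) (i + 1)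
    else pvLoopA K_node rest Kb Kt i

def selected_Kb_Kt_nodes (ListOFscore : List (Int × Int × String)) (K_node : Int) : List Int × List Int :=
  pvLoopA K_node ListOFscore [] [] 0

-- ===== PORT B =====
-- B: filter the BNS/TCS entries, keep the first K_node of them (all when K_node < 0), then partition.
def pvSelB (ListOFscore : List (Int × Int × String)) (b : Int) : List (Int × String) :=
  let ms := (ListOFscore.filter (fun t => t.2.2 == "BNS" || t.2.2 == "TCS")).map
      (fun t => (t.2.1, t.2.2))
  if b < 0 then ms else ms.take b.toNat

def selected_Kb_Kt_nodes_alt (ListOFscore : List (Int × Int × String)) (K_node : Int) : List Int × List Int :=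
  let selected := pvSelB ListOFscore K_node
  ((selected.filter (fun p => p.2 == "BNS")).map Prod.fst,
   (selected.filter (fun p => p.2 == "TCS")).map Prod.fst)

-- ===== PRECONDITION & SPEC =====
def Spec_selected_Kb_Kt_nodes (ListOFscore : List (Int × Int × String)) (K_node : Int) (out : List Int × List Int) : Prop := out = selected_Kb_Kt_nodes_alt ListOFscore K_node
instance (ListOFscore : List (Int × Int × String)) (K_node : Int) (out : List Int × List Int) : Decidable (Spec_selected_Kb_Kt_nodes ListOFscore K_node out) := by unfold Spec_selected_Kb_Kt_nodes; infer_instance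

-- ===== CLAIM (what is proved, stated in full; the proofs are below) =====
def Claim_equal_selected_Kb_Kt_nodes : Prop := ∀ (ListOFscore : List (Int × Int × String)) (K_node : Int), Dom_selected_Kb_Kt_nodes ListOFscore K_node → Spec_selected_Kb_Kt_nodes ListOFscore K_node (selected_Kb_Kt_nodes ListOFscore K_node)

-- ===== LEMMAS AND PROOFS =====

lemma pvLoopA_eq (K_node : Int) :
    ∀ (l : List (Int × Int × String)) (i : Int) (Kb Kt : List Int),
      0 ≤ i → (i ≤ K_node ∨ K_node < 0) →
      pvLoopA K_node l Kb Kt i =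
        (Kb ++ ((pvSelB l (K_node - i)).filter (fun p => p.2 == "BNS")).map Prod.fst,
         Kt ++ ((pvSelB l (K_node - i)).filter (fun p => p.2 == "TCS")).map Prod.fst) := by
  intro l
  induction l with
  | nil =>
    intro i Kb Kt _ _
    simp [pvLoopA, pvSelB]
  | cons hd tl ih =>
    intro i Kb Kt hi hk
    obtain ⟨s, each, strategy⟩ := hd
    by_cases heq : i = K_node
    · subst heq
      have : ¬ (i - i < 0) := by omega
      simp [pvLoopA, pvSelB]
    · have hk' : i + 1 ≤ K_node ∨ K_node < 0 := by omega
      by_cases hb : strategy = "BNS"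
      · have := ih (i + 1) (Kb ++ [each]) Kt (by omega) hk'
        simp [pvLoopA, heq, hb, this]
        by_cases hneg : K_node - i < 0
        · have hneg' : K_node - (i + 1) < 0 := by omega
          simp [pvSelB, hneg, hneg']
        · have hpos : 0 < K_node - i := by omega
          have hneg' : ¬ (K_node - (i + 1) < 0) := by omega
          have htn : (K_node - i).toNat = (K_node - (i + 1)).toNat + 1 := by omega
          simp [pvSelB, hneg, hneg', htn, List.take_succ_cons]
      · by_cases ht : strategy = "TCS"
        · have := ih (i + 1) Kb (Kt ++ [each]) (by omega) hk'
          simp [pvLoopA, heq, ht, this]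
          by_cases hneg : K_node - i < 0
          · have hneg' : K_node - (i + 1) < 0 := by omega
            simp [pvSelB, hneg, hneg']
          · have hpos : 0 < K_node - i := by omega
            have hneg' : ¬ (K_node - (i + 1) < 0) := by omega
            have htn : (K_node - i).toNat = (K_node - (i + 1)).toNat + 1 := by omega
            simp [pvSelB, hneg, hneg', htn, List.take_succ_cons]
        · have := ih i Kb Kt hi hk
          simp [pvLoopA, heq, hb, ht, this, pvSelB]

-- ===== VERDICT (by name: the statement is the Claim_ definition above) =====
theorem selected_Kb_Kt_nodes_spec : Claim_equal_selected_Kb_Kt_nodes := by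
  intro l k _
  unfold Spec_selected_Kb_Kt_nodes selected_Kb_Kt_nodes selected_Kb_Kt_nodes_alt
  have := pvLoopA_eq k l 0 [] [] (by omega) (by omega)
  simp at this
  simp [this]
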